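-- pv_equiv track=rewrite | github.com/cmu-delphi/delphi-epidata | src/server/endpoints/afhsb.py | _split_locations
-- ===== SOURCE A (Python) =====
-- from typing import Dict, List
--
-- def _split_locations(locations: List[str]):
--     # split locations into national/regional/state
--     location_dict: Dict[str, List[str]] = {
--         "hhs": [],
--         "cen": [],
--         "state": [],
--         "country": [],
--     }
--     for location in locations:
--         location = location.lower()
--         if location[0:3] == "hhs":
--             location_dict["hhs"].append(location)
--         elif location[0:3] == "cen":
--             location_dict["cen"].append(location)
--         elif len(location) == 3:
--             location_dict["country"].append(location)
--         elif len(location) == 2: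
--             location_dict["state"].append(location)
--     return location_dict
-- ===== SOURCE B (Python) =====
-- from typing import Dict, List
--
-- def _split_locations(locations: List[str]):
--     # split locations into national/regional/state
--     lowered = [loc.lower() for loc in locations]
--     return {
--         "hhs": [l for l in lowered if l[:3] == "hhs"],
--         "cen": [l for l in lowered if l[:3] == "cen"],
--         "state": [l for l in lowered if len(l) == 2],
--         "country": [l for l in lowered if len(l) == 3 and l not in ("hhs", "cen")],
--     }
-- ===== Notes on version B (the rewrite author's own statement) =====
-- stated objective: simpler
-- what changed: A classifies each location in one loop of prioritized elif branches appending into a mutable dict; B lowercases once and builds each of the four buckets with its own independent list-comprehension filter.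
import Mathlib
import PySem

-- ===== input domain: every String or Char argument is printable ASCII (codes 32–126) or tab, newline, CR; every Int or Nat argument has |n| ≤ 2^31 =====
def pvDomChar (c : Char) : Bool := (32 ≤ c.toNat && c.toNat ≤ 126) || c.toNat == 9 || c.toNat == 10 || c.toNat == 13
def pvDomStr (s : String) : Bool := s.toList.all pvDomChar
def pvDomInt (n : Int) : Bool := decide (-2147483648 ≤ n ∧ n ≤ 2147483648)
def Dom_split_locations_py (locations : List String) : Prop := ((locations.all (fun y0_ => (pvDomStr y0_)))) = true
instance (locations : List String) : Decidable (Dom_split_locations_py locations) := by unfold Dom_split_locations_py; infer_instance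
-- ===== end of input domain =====

-- B lowercases once and builds each bucket with its own independent filter instead of A's
-- single priority-branch loop over a mutable dict; objective: simpler decomposition (same cost).

-- ===== PORT A =====
-- one iteration of A's loop body (dict["k"].append(x) is modify "k" [] (· ++ [x]))
def splitStep (d : PySem.Dict String (List String)) (location : String) : PySem.Dict String (List String) :=
  let location := PySem.Str.lower location
  if PySem.Str.slice location (some 0) (some 3) = "hhs" then d.modify "hhs" [] (· ++ [location])
  else if PySem.Str.slice location (some 0) (some 3) = "cen" then d.modify "cen" [] (· ++ [location])
  else if PySem.Str.len location = 3 then d.modify "country" [] (· ++ [location])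
  else if PySem.Str.len location = 2 then d.modify "state" [] (· ++ [location])
  else d

def split_locations_py (locations : List String) : List (String × List String) :=
  (locations.foldl splitStep
    (PySem.Dict.ofList [("hhs", []), ("cen", []), ("state", []), ("country", [])])).items

-- ===== PORT B =====
def split_locations_py_alt (locations : List String) : List (String × List String) :=
  let lowered := locations.map PySem.Str.lower
  [("hhs", lowered.filter (fun l => PySem.Str.slice l (some 0) (some 3) == "hhs")),
   ("cen", lowered.filter (fun l => PySem.Str.slice l (some 0) (some 3) == "cen")),
   ("state", lowered.filter (fun l => PySem.Str.len l == 2)),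
   ("country", lowered.filter (fun l => PySem.Str.len l == 3 && l != "hhs" && l != "cen"))]

-- ===== PRECONDITION & SPEC =====
def Spec_split_locations_py (locations : List String) (out : List (String × List String)) : Prop := out = split_locations_py_alt locations
instance (locations : List String) (out : List (String × List String)) : Decidable (Spec_split_locations_py locations out) := by unfold Spec_split_locations_py; infer_instance

-- ===== CLAIM (what is proved, stated in full; the proofs are below) =====
def Claim_equal_split_locations_py : Prop := ∀ (locations : List String), Dom_split_locations_py locations → Spec_split_locations_py locations (split_locations_py locations)

-- ===== LEMMAS AND PROOFS =====

-- l[:3] is take 3 on the character list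
lemma slice03_toList (l : String) :
    (PySem.Str.slice l (some 0) (some 3)).toList = l.toList.take 3 := by
  simp [PySem.List.slice]

lemma length_ge_of_slice03 (l t : String) (ht : t.toList.length = 3)
    (h : PySem.Str.slice l (some 0) (some 3) = t) : 3 ≤ l.toList.length := by
  have h' := congrArg String.toList h
  rw [slice03_toList] at h'
  have := congrArg List.length h'
  rw [List.length_take, ht] at this
  omega

lemma slice03_eq_self (l : String) (h : l.toList.length ≤ 3) :
    PySem.Str.slice l (some 0) (some 3) = l := by
  apply String.ext
  simpa [List.take_of_length_le h] using slice03_toList l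

lemma len_eq_toList (l : String) : PySem.Str.len l = (l.toList.length : Int) := by
  simp only [PySem.Str.len_eq, String.length_toList]

-- splitStep on A's concrete four-key dict, one lemma per branch
lemma stepHhs (h c s co : List String) (a : String)
    (h1 : PySem.Str.slice (PySem.Str.lower a) (some 0) (some 3) = "hhs") :
    splitStep (PySem.Dict.mk [("hhs", h), ("cen", c), ("state", s), ("country", co)]) a
    = PySem.Dict.mk [("hhs", h ++ [PySem.Str.lower a]), ("cen", c), ("state", s), ("country", co)] := by
  simp [splitStep, h1, PySem.Dict.modify, PySem.Dict.insert, PySem.Dict.getD, PySem.Dict.get?, PySem.Dict.contains]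

lemma stepCen (h c s co : List String) (a : String)
    (_h1 : ¬ PySem.Str.slice (PySem.Str.lower a) (some 0) (some 3) = "hhs")
    (h2 : PySem.Str.slice (PySem.Str.lower a) (some 0) (some 3) = "cen") :
    splitStep (PySem.Dict.mk [("hhs", h), ("cen", c), ("state", s), ("country", co)]) a
    = PySem.Dict.mk [("hhs", h), ("cen", c ++ [PySem.Str.lower a]), ("state", s), ("country", co)] := by
  simp [splitStep, h2, PySem.Dict.modify, PySem.Dict.insert, PySem.Dict.getD, PySem.Dict.get?, PySem.Dict.contains]

lemma stepCountry (h c s co : List String) (a : String)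
    (h1 : ¬ PySem.Str.slice (PySem.Str.lower a) (some 0) (some 3) = "hhs")
    (h2 : ¬ PySem.Str.slice (PySem.Str.lower a) (some 0) (some 3) = "cen")
    (h3 : PySem.Str.len (PySem.Str.lower a) = 3) :
    splitStep (PySem.Dict.mk [("hhs", h), ("cen", c), ("state", s), ("country", co)]) a
    = PySem.Dict.mk [("hhs", h), ("cen", c), ("state", s), ("country", co ++ [PySem.Str.lower a])] := by
  simp only [len_eq_toList, PySem.Str.toList_lower] at h3
  simp [splitStep, h1, h2, h3, PySem.Dict.modify, PySem.Dict.insert, PySem.Dict.getD, PySem.Dict.get?, PySem.Dict.contains]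

lemma stepState (h c s co : List String) (a : String)
    (h1 : ¬ PySem.Str.slice (PySem.Str.lower a) (some 0) (some 3) = "hhs")
    (h2 : ¬ PySem.Str.slice (PySem.Str.lower a) (some 0) (some 3) = "cen")
    (_h3 : ¬ PySem.Str.len (PySem.Str.lower a) = 3)
    (h4 : PySem.Str.len (PySem.Str.lower a) = 2) :
    splitStep (PySem.Dict.mk [("hhs", h), ("cen", c), ("state", s), ("country", co)]) a
    = PySem.Dict.mk [("hhs", h), ("cen", c), ("state", s ++ [PySem.Str.lower a]), ("country", co)] := by
  simp only [len_eq_toList, PySem.Str.toList_lower] at h4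
  simp [splitStep, h1, h2, h4, PySem.Dict.modify, PySem.Dict.insert, PySem.Dict.getD, PySem.Dict.get?, PySem.Dict.contains]

lemma stepNone (h c s co : List String) (a : String)
    (h1 : ¬ PySem.Str.slice (PySem.Str.lower a) (some 0) (some 3) = "hhs")
    (h2 : ¬ PySem.Str.slice (PySem.Str.lower a) (some 0) (some 3) = "cen")
    (h3 : ¬ PySem.Str.len (PySem.Str.lower a) = 3)
    (h4 : ¬ PySem.Str.len (PySem.Str.lower a) = 2) :
    splitStep (PySem.Dict.mk [("hhs", h), ("cen", c), ("state", s), ("country", co)]) a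
    = PySem.Dict.mk [("hhs", h), ("cen", c), ("state", s), ("country", co)] := by
  simp only [len_eq_toList, PySem.Str.toList_lower] at h3 h4
  simp [splitStep, h1, h2, h3, h4]

-- the invariant of A's loop: folding splitStep appends each bucket's filter
lemma foldA (ls : List String) (h c s co : List String) :
    (ls.foldl splitStep (PySem.Dict.mk [("hhs", h), ("cen", c), ("state", s), ("country", co)])).items
    = [("hhs", h ++ (ls.map PySem.Str.lower).filter (fun l => PySem.Str.slice l (some 0) (some 3) == "hhs")),
       ("cen", c ++ (ls.map PySem.Str.lower).filter (fun l => PySem.Str.slice l (some 0) (some 3) == "cen")),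
       ("state", s ++ (ls.map PySem.Str.lower).filter (fun l => PySem.Str.len l == 2)),
       ("country", co ++ (ls.map PySem.Str.lower).filter (fun l => PySem.Str.len l == 3 && l != "hhs" && l != "cen"))] := by
  induction ls generalizing h c s co with
  | nil => simp
  | cons a ls ih =>
    have hL := @String.length_toList (PySem.Str.lower a)
    rw [List.foldl_cons, List.map_cons]
    by_cases h1 : PySem.Str.slice (PySem.Str.lower a) (some 0) (some 3) = "hhs"
    · have hlen : 3 ≤ (PySem.Str.lower a).toList.length :=
        length_ge_of_slice03 _ "hhs" (by decide) h1
      have hn2 : ¬ (((PySem.Str.lower a).length : Int) = 2) := by omega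
      have h2 : ¬ PySem.Str.slice (PySem.Str.lower a) (some 0) (some 3) = "cen" := by
        rw [h1]; decide
      rw [stepHhs _ _ _ _ _ h1, ih]
      simp [List.filter_cons, h1, hn2]
      intro e3 ehh
      have e3' : (PySem.Str.lower a).toList.length = 3 := by
        rw [hL]; exact_mod_cast e3
      exact absurd (by rw [← slice03_eq_self (PySem.Str.lower a) (by omega)]; exact h1) ehh
    · by_cases h2 : PySem.Str.slice (PySem.Str.lower a) (some 0) (some 3) = "cen"
      · have hlen : 3 ≤ (PySem.Str.lower a).toList.length :=
          length_ge_of_slice03 _ "cen" (by decide) h2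
        have hn2 : ¬ (((PySem.Str.lower a).length : Int) = 2) := by omega
        rw [stepCen _ _ _ _ _ h1 h2, ih]
        simp [List.filter_cons, h2, hn2]
        intro e3 _
        have e3' : (PySem.Str.lower a).toList.length = 3 := by
          rw [hL]; exact_mod_cast e3
        rw [← slice03_eq_self (PySem.Str.lower a) (by omega)]; exact h2
      · by_cases h3 : PySem.Str.len (PySem.Str.lower a) = 3
        · have h3' : (PySem.Str.lower a).toList.length = 3 := by
            rw [len_eq_toList] at h3; exact_mod_cast h3
          have hy3 : (((PySem.Str.lower a).length : Int) = 3) := by omega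
          have hn2 : ¬ (((PySem.Str.lower a).length : Int) = 2) := by omega
          have hself : PySem.Str.slice (PySem.Str.lower a) (some 0) (some 3) = PySem.Str.lower a :=
            slice03_eq_self _ (by omega)
          have hh : PySem.Str.lower a ≠ "hhs" := fun e => h1 (by rw [hself, e])
          have hc : PySem.Str.lower a ≠ "cen" := fun e => h2 (by rw [hself, e])
          rw [stepCountry _ _ _ _ _ h1 h2 h3, ih]
          simp [h1, h2, hy3, hh, hc]
        · by_cases h4 : PySem.Str.len (PySem.Str.lower a) = 2
          · have h4' : (PySem.Str.lower a).toList.length = 2 := by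
              rw [len_eq_toList] at h4; exact_mod_cast h4
            have hy2 : (((PySem.Str.lower a).length : Int) = 2) := by omega
            have hn3 : ¬ (((PySem.Str.lower a).length : Int) = 3) := by
              rw [len_eq_toList] at h3; omega
            rw [stepState _ _ _ _ _ h1 h2 h3 h4, ih]
            simp [h1, h2, hy2]
          · have hn3 : ¬ (((PySem.Str.lower a).length : Int) = 3) := by
              rw [len_eq_toList] at h3; omega
            have hn2 : ¬ (((PySem.Str.lower a).length : Int) = 2) := by
              rw [len_eq_toList] at h4; omega
            rw [stepNone _ _ _ _ _ h1 h2 h3 h4, ih]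
            simp [h1, h2, hn3, hn2]

-- ===== VERDICT (by name: the statement is the Claim_ definition above) =====
theorem split_locations_py_spec : Claim_equal_split_locations_py := by
  intro locations _
  unfold Spec_split_locations_py split_locations_py split_locations_py_alt
  rw [show (PySem.Dict.ofList [("hhs", ([] : List String)), ("cen", []), ("state", []), ("country", [])]) = PySem.Dict.mk [("hhs", []), ("cen", []), ("state", []), ("country", [])] from by decide]
  rw [foldA]
  simp
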